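-- pv_equiv track=rewrite | github.com/liskos/larchen | zadanie_23/21.py | f
-- ===== SOURCE A (Python) =====
-- def f(a,b):
--     if a==b:
--         return 1
--     if a>b:
--         return 0
--     if a // 10 < 9 or a%10<9:
--         return f(a+1,b)+f(a+11,b)
--     return f(a+1,b)
-- ===== SOURCE B (Python) =====
-- def f(a, b):
--     if a >= b:
--         return 1 if a == b else 0
--     n = b - a
--     w = [0] * (n + 12)
--     w[n] = 1
--     for i in range(n - 1, -1, -1):
--         v = a + i
--         t = w[i + 1]
--         if v // 10 < 9 or v % 10 < 9:
--             t += w[i + 11]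
--         w[i] = t
--     return w[0]
-- ===== Notes on version B (the rewrite author's own statement) =====
-- stated objective: alternative
-- what changed: Replaced the two-branch recursion by a bottom-up dynamic-programming table filled from b down to a, so every intermediate count is computed once (intended as faster; a timing run measured only 1.27x at the largest size both finished, with A timing out on some mid-size gaps where B returned).
import Mathlib
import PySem

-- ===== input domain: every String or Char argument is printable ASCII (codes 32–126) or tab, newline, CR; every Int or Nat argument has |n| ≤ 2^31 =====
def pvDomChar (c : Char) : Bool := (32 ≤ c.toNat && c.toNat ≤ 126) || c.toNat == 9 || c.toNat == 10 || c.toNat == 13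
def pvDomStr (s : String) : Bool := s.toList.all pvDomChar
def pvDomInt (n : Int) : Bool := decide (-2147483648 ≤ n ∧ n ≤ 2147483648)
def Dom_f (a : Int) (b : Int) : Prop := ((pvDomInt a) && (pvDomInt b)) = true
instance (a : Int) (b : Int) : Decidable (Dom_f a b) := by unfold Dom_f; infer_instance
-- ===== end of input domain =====

-- B replaces A's two-branch recursion by a bottom-up DP table over the values from b down to a, computing each count once.

-- ===== PORT A =====
-- fuel only makes the recursion structural; it never runs out: every call decreases
-- b - a by at least 1 and the recursion stops once a ≥ b, so (b-a).toNat + 1 suffices.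
def fAux (fuel : Nat) (a : Int) (b : Int) : Int :=
  match fuel with
  | 0 => 0
  | fuel + 1 =>
    if a = b then 1
    else if a > b then 0
    else if PySem.Int.floordiv a 10 < 9 ∨ PySem.Int.mod a 10 < 9 then
      fAux fuel (a + 1) b + fAux fuel (a + 11) b
    else fAux fuel (a + 1) b

def f (a : Int) (b : Int) : Int := fAux ((b - a).toNat + 1) a b

-- ===== PORT B =====
def f_alt (a : Int) (b : Int) : Int :=
  if a ≥ b then (if a = b then 1 else 0)
  else
    let n := (b - a).toNat
    let w0 := (List.replicate (n + 12) (0 : Int)).set n 1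
    let w := (List.range n).reverse.foldl
      (fun (w : List Int) (i : Nat) =>
        let v := a + (i : Int)
        let t := w.getD (i + 1) 0
        let t := if PySem.Int.floordiv v 10 < 9 ∨ PySem.Int.mod v 10 < 9 then
                   t + w.getD (i + 11) 0
                 else t
        w.set i t) w0
    w.getD 0 0

-- ===== PRECONDITION & SPEC =====
-- Pre_ excludes only inputs with b - a > 995, on which the Python A exceeds
-- CPython's recursion limit and raises RecursionError (its recursion depth is ≈ b - a).
def Pre_f (a : Int) (b : Int) : Prop := b - a ≤ 995
instance (a : Int) (b : Int) : Decidable (Pre_f a b) := by unfold Pre_f; infer_instance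
def pvWitness_f : Int × Int := (0, 30)
def Spec_f (a : Int) (b : Int) (out : Int) : Prop := out = f_alt a b
instance (a : Int) (b : Int) (out : Int) : Decidable (Spec_f a b out) := by unfold Spec_f; infer_instance

-- ===== CLAIM (what is proved, stated in full; the proofs are below) =====
def Claim_equal_f : Prop := ∀ (a : Int) (b : Int), Dom_f a b → Pre_f a b → Spec_f a b (f a b)

-- ===== LEMMAS AND PROOFS =====

-- the fuel is irrelevant as long as it exceeds (b - a).toNat
lemma fAux_fuel (f1 : Nat) : ∀ (f2 : Nat) (a b : Int), (b - a).toNat < f1 → (b - a).toNat < f2 →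
    fAux f1 a b = fAux f2 a b := by
  induction f1 with
  | zero => intro f2 a b h1; omega
  | succ f1 ih =>
    intro f2 a b h1 h2
    match f2, h2 with
    | f2 + 1, h2 =>
      rw [fAux, fAux]
      by_cases hab : a = b
      · rw [if_pos hab, if_pos hab]
      · rw [if_neg hab, if_neg hab]
        by_cases hgt : a > b
        · rw [if_pos hgt, if_pos hgt]
        · rw [if_neg hgt, if_neg hgt]
          have e1 := ih f2 (a + 1) b (by omega) (by omega)
          have e11 := ih f2 (a + 11) b (by omega) (by omega)
          split
          · rw [e1, e11]
          · rw [e1]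

lemma f_self (b : Int) : f b b = 1 := by rw [f, fAux]; simp

lemma f_gt (a b : Int) (h : b < a) : f a b = 0 := by
  rw [f, fAux]; rw [if_neg (by omega), if_pos h]

lemma f_eq_of_lt (a b : Int) (h : a < b) :
    f a b = f (a + 1) b +
      (if PySem.Int.floordiv a 10 < 9 ∨ PySem.Int.mod a 10 < 9 then f (a + 11) b else 0) := by
  rw [f, fAux]
  rw [if_neg (by omega), if_neg (by omega)]
  have e1 : fAux ((b - a).toNat) (a + 1) b = f (a + 1) b :=
    fAux_fuel _ _ _ _ (by omega) (by omega)
  have e11 : fAux ((b - a).toNat) (a + 11) b = f (a + 11) b :=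
    fAux_fuel _ _ _ _ (by omega) (by omega)
  split <;> rw [e1] <;> simp [e11]

-- the loop body of B
def fStep (a : Int) (w : List Int) (i : Nat) : List Int :=
  let v := a + (i : Int)
  let t := w.getD (i + 1) 0
  let t := if PySem.Int.floordiv v 10 < 9 ∨ PySem.Int.mod v 10 < 9 then
             t + w.getD (i + 11) 0
           else t
  w.set i t

lemma fStep_length (a : Int) (w : List Int) (i : Nat) :
    (fStep a w i).length = w.length := by
  simp [fStep]

lemma getD_set_self (w : List Int) (i : Nat) (x : Int) (h : i < w.length) :
    (w.set i x).getD i 0 = x := by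
  simp [List.getD_eq_getElem?_getD, h]

lemma getD_set_ne (w : List Int) (i j : Nat) (x : Int) (h : i ≠ j) :
    (w.set i x).getD j 0 = w.getD j 0 := by
  simp [List.getD_eq_getElem?_getD, List.getElem?_set_ne h]

-- main invariant: folding the loop over [k-1, …, 0] extends "w holds f's values from k up" to all indices
lemma loop_inv (a b : Int) (n : Nat) (hn : (n : Int) = b - a) :
    ∀ (k : Nat), k ≤ n → ∀ (w : List Int), w.length = n + 12 →
      (∀ j : Nat, k ≤ j → w.getD j 0 = f (a + (j : Int)) b) →
      ∀ j : Nat, (((List.range k).reverse).foldl (fStep a) w).getD j 0 = f (a + (j : Int)) b := by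
  intro k
  induction k with
  | zero =>
    intro _ w _ hw j
    simpa using hw j (Nat.zero_le j)
  | succ k ih =>
    intro hk w hlen hw j
    rw [List.range_succ, List.reverse_append]
    simp only [List.reverse_singleton, List.singleton_append, List.foldl_cons]
    apply ih (by omega) _ (by rw [fStep_length]; exact hlen)
    intro j hj
    by_cases hjk : j = k
    · -- j = k : the freshly written cell
      subst hjk
      show (fStep a w j).getD j 0 = _
      unfold fStep
      rw [getD_set_self _ _ _ (by omega)]
      have hlt : a + (j : Int) < b := by omega
      rw [f_eq_of_lt _ _ hlt]
      have h1 : w.getD (j + 1) 0 = f (a + (j : Int) + 1) b := by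
        have := hw (j + 1) (by omega)
        rw [this]; push_cast; ring_nf
      have h11 : w.getD (j + 11) 0 = f (a + (j : Int) + 11) b := by
        have := hw (j + 11) (by omega)
        rw [this]; push_cast; ring_nf
      split
      · rw [h1, h11]
      · rw [h1]; ring
    · -- j > k : untouched cell
      show (fStep a w k).getD j 0 = _
      unfold fStep
      rw [getD_set_ne _ _ _ _ (by omega)]
      exact hw j (by omega)

lemma init_inv (a b : Int) (n : Nat) (hn : (n : Int) = b - a) :
    ∀ j : Nat, n ≤ j →
      ((List.replicate (n + 12) (0 : Int)).set n 1).getD j 0 = f (a + (j : Int)) b := by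
  intro j hj
  by_cases hjn : j = n
  · subst hjn
    rw [getD_set_self _ _ _ (by simp)]
    have hb : a + (j : Int) = b := by omega
    rw [hb, f_self]
  · rw [getD_set_ne _ _ _ _ (by omega)]
    have h0 : f (a + (j : Int)) b = 0 := f_gt _ _ (by omega)
    rw [h0]
    simp [List.getD_eq_getElem?_getD, List.getElem?_replicate]
    split <;> rfl

-- ===== VERDICT (by name: the statement is the Claim_ definition above) =====
theorem f_spec : Claim_equal_f := by
  intro a b _ _
  unfold Spec_f f_alt
  by_cases hab : a ≥ b
  · rw [if_pos hab]
    by_cases h : a = b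
    · rw [if_pos h, h, f_self]
    · rw [if_neg h, f_gt _ _ (by omega)]
  · rw [if_neg hab]
    have hlt : a < b := by omega
    have hn : (((b - a).toNat : Nat) : Int) = b - a := Int.toNat_of_nonneg (by omega)
    simp only []
    have := loop_inv a b (b - a).toNat hn (b - a).toNat le_rfl
      ((List.replicate ((b - a).toNat + 12) (0 : Int)).set (b - a).toNat 1)
      (by simp) (init_inv a b _ hn) 0
    simpa [fStep] using this.symm
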